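-- pv_equiv track=rewrite | github.com/Jahnesta3rd/Mingus-2025 | scripts/step5_ai_article_classifier_demo.py | _determine_classification_type
-- ===== SOURCE A (Python) =====
-- def _determine_classification_type(content: str) -> str:
--     """Determine classification type based on content keywords"""
--     mindset_keywords = ['confidence', 'mindset', 'belief', 'identity', 'presence', 'mental']
--     skills_keywords = ['negotiation', 'skill', 'strategy', 'action', 'technique', 'how to']
--     wealth_keywords = ['investment', 'wealth', 'portfolio', 'million', 'financial', 'money']
--
--     mindset_score = sum(1 for keyword in mindset_keywords if keyword in content)
--     skills_score = sum(1 for keyword in skills_keywords if keyword in content)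
--     wealth_score = sum(1 for keyword in wealth_keywords if keyword in content)
--
--     if wealth_score > skills_score and wealth_score > mindset_score:
--         return 'wealth'
--     elif skills_score > mindset_score:
--         return 'skills'
--     else:
--         return 'mindset'
-- ===== SOURCE B (Python) =====
-- def _determine_classification_type(content: str) -> str:
--     """Inverted index: one pass over (keyword -> category) pairs builds a counter,
--     then a sort on (-count, priority rank) picks the winner."""
--     kw2cat = {
--         'confidence': 'mindset', 'mindset': 'mindset', 'belief': 'mindset',
--         'identity': 'mindset', 'presence': 'mindset', 'mental': 'mindset',
--         'negotiation': 'skills', 'skill': 'skills', 'strategy': 'skills',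
--         'action': 'skills', 'technique': 'skills', 'how to': 'skills',
--         'investment': 'wealth', 'wealth': 'wealth', 'portfolio': 'wealth',
--         'million': 'wealth', 'financial': 'wealth', 'money': 'wealth',
--     }
--     matched = [cat for kw, cat in kw2cat.items() if kw in content]
--     counts = {}
--     for cat in matched:
--         counts[cat] = counts.get(cat, 0) + 1
--     order = ['mindset', 'skills', 'wealth']
--     ranked = sorted(order, key=lambda c: (-counts.get(c, 0), order.index(c)))
--     return ranked[0]
-- ===== Notes on version B (the rewrite author's own statement) =====
-- stated objective: alternative
-- what changed: Replaces the three per-category keyword sums and the if/elif/else cascade with an inverted keyword->category index scanned in one pass into a counter dict, followed by sorting the categories on (-count, priority rank) and returning the head of the ranking.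
import Mathlib
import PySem

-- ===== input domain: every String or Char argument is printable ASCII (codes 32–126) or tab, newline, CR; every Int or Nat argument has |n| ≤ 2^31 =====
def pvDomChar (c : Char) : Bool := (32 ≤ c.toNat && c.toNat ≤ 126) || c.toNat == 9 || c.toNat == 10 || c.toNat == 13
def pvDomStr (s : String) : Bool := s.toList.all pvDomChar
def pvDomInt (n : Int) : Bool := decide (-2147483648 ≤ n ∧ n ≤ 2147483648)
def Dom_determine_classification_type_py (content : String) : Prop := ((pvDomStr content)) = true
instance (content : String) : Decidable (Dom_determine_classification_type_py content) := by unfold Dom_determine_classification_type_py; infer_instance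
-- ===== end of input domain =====

-- B replaces A's three per-category sums and if/elif/else cascade with an inverted
-- keyword->category index, one counting pass into a counter dict, and a sort on
-- (-count, priority rank) whose head is returned; objective: alternative structure.


-- ===== PORT A =====
def determine_classification_type_py (content : String) : String :=
  let mindset_keywords : List String := ["confidence", "mindset", "belief", "identity", "presence", "mental"]
  let skills_keywords : List String := ["negotiation", "skill", "strategy", "action", "technique", "how to"]
  let wealth_keywords : List String := ["investment", "wealth", "portfolio", "million", "financial", "money"]
  let mindset_score : Int := mindset_keywords.foldl (fun acc kw => if PySem.Str.isIn kw content then acc + 1 else acc) 0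
  let skills_score : Int := skills_keywords.foldl (fun acc kw => if PySem.Str.isIn kw content then acc + 1 else acc) 0
  let wealth_score : Int := wealth_keywords.foldl (fun acc kw => if PySem.Str.isIn kw content then acc + 1 else acc) 0
  if wealth_score > skills_score ∧ wealth_score > mindset_score then "wealth"
  else if skills_score > mindset_score then "skills"
  else "mindset"

-- ===== PORT B =====
-- the inverted index: dict keyword -> category, iterated as its items (insertion order)
def pvKw2Cat : List (String × String) :=
  [("confidence", "mindset"), ("mindset", "mindset"), ("belief", "mindset"),
   ("identity", "mindset"), ("presence", "mindset"), ("mental", "mindset"),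
   ("negotiation", "skills"), ("skill", "skills"), ("strategy", "skills"),
   ("action", "skills"), ("technique", "skills"), ("how to", "skills"),
   ("investment", "wealth"), ("wealth", "wealth"), ("portfolio", "wealth"),
   ("million", "wealth"), ("financial", "wealth"), ("money", "wealth")]

def determine_classification_type_py_alt (content : String) : String :=
  let matched : List String :=
    (pvKw2Cat.filter (fun p => PySem.Str.isIn p.1 content)).map (fun p => p.2)
  let counts : PySem.Dict String Int :=
    matched.foldl (fun d cat => d.insert cat (d.getD cat 0 + 1)) PySem.Dict.empty
  let order : List String := ["mindset", "skills", "wealth"]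
  let ranked : List String :=
    PySem.List.sorted2 order (fun c => -(counts.getD c 0))
      (fun c => (((PySem.List.index? order c).getD 0 : Nat) : Int)) false
  ranked.headD ""

-- ===== PRECONDITION & SPEC =====
def Spec_determine_classification_type_py (content : String) (out : String) : Prop := out = determine_classification_type_py_alt content
instance (content : String) (out : String) : Decidable (Spec_determine_classification_type_py content out) := by unfold Spec_determine_classification_type_py; infer_instance

-- ===== CLAIM (what is proved, stated in full; the proofs are below) =====
def Claim_equal_determine_classification_type_py : Prop := ∀ (content : String), Dom_determine_classification_type_py content → Spec_determine_classification_type_py content (determine_classification_type_py content)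

-- ===== LEMMAS AND PROOFS =====

-- insertion-sort step facts (definitional)
theorem pv_ins_nil (lt : String → String → Bool) (x : String) :
    PySem.List.insertBy lt x [] = [x] := rfl
theorem pv_ins_cons (lt : String → String → Bool) (x y : String) (ys : List String) :
    PySem.List.insertBy lt x (y :: ys) = if lt x y then x :: y :: ys else y :: PySem.List.insertBy lt x ys := rfl

-- head of inserting three elements
theorem pv_head_ins3 (lt : String → String → Bool) (a b c : String) :
    ((PySem.List.insertBy lt c (PySem.List.insertBy lt b (PySem.List.insertBy lt a []))).head?.getD "")
      = if lt c (if lt b a then b else a) then c else if lt b a then b else a := by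
  cases hba : lt b a <;> cases h2 : lt c b <;> cases h3 : lt c a <;>
    simp only [pv_ins_cons, pv_ins_nil, hba, h2, h3, Bool.false_eq_true, if_true, if_false,
      List.head?_cons, Option.getD_some]

-- the two-step selection equals A's branch cascade
theorem pv_rank_core (lt : String → String → Bool) (m s w : Int)
    (c1 : lt "skills" "mindset" = decide (m < s))
    (c2 : lt "wealth" "skills" = decide (s < w))
    (c3 : lt "wealth" "mindset" = decide (m < w)) :
    (if lt "wealth" (if lt "skills" "mindset" then "skills" else "mindset") then "wealth"
      else if lt "skills" "mindset" then "skills" else "mindset")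
      = if w > s ∧ w > m then "wealth" else if s > m then "skills" else "mindset" := by
  by_cases h1 : m < s <;> by_cases h2 : s < w <;> by_cases h3 : m < w <;>
    (try (exfalso; omega)) <;> simp [c1, c2, c3, h1, h2, h3]

-- B's ranking step on the three-category list, characterised as A's branch cascade.
theorem pv_rank_eq (k1 : String → Int) (m s w : Int)
    (hm : k1 "mindset" = -m) (hs : k1 "skills" = -s) (hw : k1 "wealth" = -w) :
    (PySem.List.sorted2 ["mindset", "skills", "wealth"] k1
        (fun c => (((PySem.List.index? ["mindset", "skills", "wealth"] c).getD 0 : Nat) : Int)) false).headD ""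
      = if w > s ∧ w > m then "wealth" else if s > m then "skills" else "mindset" := by
  have j0 : (List.idxOf? "mindset" ["mindset", "skills", "wealth"]).getD 0 = 0 := by decide
  have j1 : (List.idxOf? "skills" ["mindset", "skills", "wealth"]).getD 0 = 1 := by decide
  have j2 : (List.idxOf? "wealth" ["mindset", "skills", "wealth"]).getD 0 = 2 := by decide
  simp only [PySem.List.sorted2, List.foldl_cons, List.foldl_nil]
  rw [show ∀ (l : List String), l.headD "" = l.head?.getD "" from fun l => by cases l <;> rfl]
  rw [pv_head_ins3, pv_rank_core _ m s w
        (by norm_num [hm, hs, PySem.List.index?_eq_idxOf?, j0, j1, neg_lt_neg_iff])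
        (by norm_num [hs, hw, PySem.List.index?_eq_idxOf?, j1, j2, neg_lt_neg_iff])
        (by norm_num [hm, hw, PySem.List.index?_eq_idxOf?, j0, j2, neg_lt_neg_iff])]

-- the matched-category list counts each category exactly countP over its keyword group
theorem pv_count_mindset (content : String) :
    ((List.count "mindset" ((pvKw2Cat.filter (fun p => PySem.Str.isIn p.1 content)).map (fun p => p.2)) : Nat) : Int)
      = ((["confidence", "mindset", "belief", "identity", "presence", "mental"].countP
          (fun kw => PySem.Str.isIn kw content) : Nat) : Int) := by
  simp [pvKw2Cat, List.count_eq_countP, List.countP_map, List.countP_filter, Function.comp,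
    List.countP_cons, List.countP_nil]

theorem pv_count_skills (content : String) :
    ((List.count "skills" ((pvKw2Cat.filter (fun p => PySem.Str.isIn p.1 content)).map (fun p => p.2)) : Nat) : Int)
      = ((["negotiation", "skill", "strategy", "action", "technique", "how to"].countP
          (fun kw => PySem.Str.isIn kw content) : Nat) : Int) := by
  simp [pvKw2Cat, List.count_eq_countP, List.countP_map, List.countP_filter, Function.comp,
    List.countP_cons, List.countP_nil]

theorem pv_count_wealth (content : String) :
    ((List.count "wealth" ((pvKw2Cat.filter (fun p => PySem.Str.isIn p.1 content)).map (fun p => p.2)) : Nat) : Int)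
      = ((["investment", "wealth", "portfolio", "million", "financial", "money"].countP
          (fun kw => PySem.Str.isIn kw content) : Nat) : Int) := by
  simp [pvKw2Cat, List.count_eq_countP, List.countP_map, List.countP_filter, Function.comp,
    List.countP_cons, List.countP_nil]

-- ===== VERDICT (by name: the statement is the Claim_ definition above) =====
theorem determine_classification_type_py_spec : Claim_equal_determine_classification_type_py := by
  intro content _
  show determine_classification_type_py content = determine_classification_type_py_alt content
  unfold determine_classification_type_py determine_classification_type_py_alt
  simp only [PySem.Dict.foldl_insert_getD_add_one_eq_counter, PySem.Dict.getD_counter,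
    PySem.List.foldl_if_add_one]
  rw [pv_rank_eq _
        ((List.count "mindset" ((pvKw2Cat.filter (fun p => PySem.Str.isIn p.1 content)).map (fun p => p.2)) : Nat) : Int)
        ((List.count "skills" ((pvKw2Cat.filter (fun p => PySem.Str.isIn p.1 content)).map (fun p => p.2)) : Nat) : Int)
        ((List.count "wealth" ((pvKw2Cat.filter (fun p => PySem.Str.isIn p.1 content)).map (fun p => p.2)) : Nat) : Int)
        rfl rfl rfl]
  simp only [zero_add, pv_count_mindset, pv_count_skills, pv_count_wealth]
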